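-- pv_equiv track=rewrite | github.com/amirY2000/code | homework.py | every_other_new
-- ===== SOURCE A (Python) =====
-- def every_other_new(liist:list)->list:
--     """
--     return a new list consisting of every other elements of the old list
--     >>>l = [1,2,3,4,5]
--     >>>every_other_new(l)
--     [1,_,3,_5]
--     """
--     lisst = []
--     for i in range(0,len(liist)):
--         if i % 2 != 0:
--             lisst.append("_")
--         else:
--             lisst.append(liist[i])
--     return lisst
-- ===== SOURCE B (Python) =====
-- def every_other_new(liist: list) -> list:
--     """Copy the list and overwrite the odd-index stride in one bulk slice assignment."""
--     out = list(liist)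
--     out[1::2] = ["_"] * len(out[1::2])
--     return out
-- ===== Notes on version B (the rewrite author's own statement) =====
-- stated objective: idiomatic
-- what changed: Replaced the per-index loop with its modulo branch by a shallow copy plus a single bulk strided-slice assignment out[1::2] = ['_']*len(out[1::2]).
import Mathlib
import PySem

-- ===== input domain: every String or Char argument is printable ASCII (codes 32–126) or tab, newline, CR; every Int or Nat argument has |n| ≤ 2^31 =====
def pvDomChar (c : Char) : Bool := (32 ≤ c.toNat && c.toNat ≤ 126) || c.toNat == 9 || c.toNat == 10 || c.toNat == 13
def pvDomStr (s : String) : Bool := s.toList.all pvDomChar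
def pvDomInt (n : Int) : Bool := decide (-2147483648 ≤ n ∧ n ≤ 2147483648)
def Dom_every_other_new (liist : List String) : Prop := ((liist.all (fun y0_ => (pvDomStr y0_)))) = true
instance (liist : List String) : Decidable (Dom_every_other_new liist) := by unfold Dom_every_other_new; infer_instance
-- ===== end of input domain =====

-- B replaces A's per-index loop and modulo branch with a copy plus one bulk odd-stride overwrite (idiomatic; same O(n) cost).


-- ===== PORT A =====
-- index i ranges over 0..len-1, so liist[i] never raises; pyGetD is exact there
def every_other_new (liist : List String) : List String :=
  (PySem.List.pyRange 0 (liist.length : Int) 1).foldl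
    (fun lisst i =>
      if PySem.Int.mod i 2 ≠ 0 then lisst ++ ["_"]
      else lisst ++ [PySem.List.pyGetD liist i ""]) []

-- ===== PORT B =====
-- out[1::2] = ["_"] * len(out[1::2]): keep each even-index element, overwrite each odd-index one with "_"
def pvAssignOddStride : List String → List String
  | [] => []
  | [x] => [x]
  | x :: _ :: t => x :: "_" :: pvAssignOddStride t

def every_other_new_alt (liist : List String) : List String :=
  pvAssignOddStride liist

-- ===== PRECONDITION & SPEC =====
def Spec_every_other_new (liist : List String) (out : List String) : Prop := out = every_other_new_alt liist
instance (liist : List String) (out : List String) : Decidable (Spec_every_other_new liist out) := by unfold Spec_every_other_new; infer_instance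

-- ===== CLAIM (what is proved, stated in full; the proofs are below) =====
def Claim_equal_every_other_new : Prop := ∀ (liist : List String), Dom_every_other_new liist → Spec_every_other_new liist (every_other_new liist)

-- ===== LEMMAS AND PROOFS =====

-- A's loop as a map over range(len)
theorem every_other_new_eq_map (l : List String) :
    every_other_new l =
      (List.range l.length).map (fun k => if k % 2 ≠ 0 then "_" else l.getD k "") := by
  unfold every_other_new
  have h : ∀ (xs : List Int) (acc : List String),
      xs.foldl (fun lisst i =>
        if PySem.Int.mod i 2 ≠ 0 then lisst ++ ["_"]
        else lisst ++ [PySem.List.pyGetD l i ""]) acc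
      = xs.foldl (fun lisst i =>
          lisst ++ [if PySem.Int.mod i 2 ≠ 0 then "_" else PySem.List.pyGetD l i ""]) acc := by
    intro xs
    induction xs with
    | nil => intro acc; rfl
    | cons x xs ih =>
        intro acc
        simp only [List.foldl_cons]
        rw [ih]
        congr 1
        split <;> rfl
  rw [h, PySem.List.foldl_append_singleton_eq_map, PySem.List.pyRange_one]
  simp only [List.map_map]
  apply List.map_congr_left
  intro a _
  have hc : ((a : Int) % 2 = 1) ↔ (a % 2 = 1) := by omega
  simp [hc]

-- the map form is exactly B's stride assignment
theorem map_range_eq_assign (l : List String) :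
    (List.range l.length).map (fun k => if k % 2 ≠ 0 then "_" else l.getD k "") =
      pvAssignOddStride l := by
  induction l using pvAssignOddStride.induct with
  | case1 => rfl
  | case2 x => rfl
  | case3 x y t ih =>
      have h2 : (x :: y :: t).length = t.length + 1 + 1 := rfl
      rw [pvAssignOddStride, h2, List.range_succ_eq_map, List.range_succ_eq_map]
      simp only [List.map_cons, List.map_map]
      rw [← ih]
      refine List.cons_eq_cons.mpr ⟨by simp, List.cons_eq_cons.mpr ⟨by simp, ?_⟩⟩
      apply List.map_congr_left
      intro a _
      have hc : ((a + 1 + 1) % 2 = 1) ↔ (a % 2 = 1) := by omega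
      simp [hc]

-- ===== VERDICT (by name: the statement is the Claim_ definition above) =====
theorem every_other_new_spec : Claim_equal_every_other_new := by
  intro l _
  unfold Spec_every_other_new every_other_new_alt
  rw [every_other_new_eq_map, map_range_eq_assign]
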